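-- pv_equiv track=rewrite | github.com/Ghanashyam-Bhat/CompetitiveProgramming | HeroMonster.py | survival
-- ===== SOURCE A (Python) =====
-- def survival(A,B,n,ai,bi):
--     #c = list(zip(ai,bi))
--     #c.sort(key= lambda x:x[0])
--     #ai , bi = zip(*c)
--     #ai = list(ai)
--     #bi = list(bi)
--     x = -1
--     y = 0
--     for each_monster in range(n): #For each monster
--         x += 1
--         z = int(bi[x])
--         while z > 0 :
--             #For each fight
--             z -= A
--             B -= int(ai[x])
--             if z <= 0: #whenever monster dies
--                 y+=1
--             if B <= 0: #when hero dies
--                 break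
--         if B <= 0:#when hero dies
--             return  "Hero is dead",y
--             break
--     if y==n :
--         return "Hero survived" , y
-- ===== SOURCE B (Python) =====
-- def survival(A, B, n, ai, bi):
--     kills = 0
--     for x in range(n):
--         b = bi[x]
--         if b <= 0:                              # monster already dead: no fight, no kill
--             if B <= 0:
--                 return "Hero is dead", kills
--             continue
--         a = ai[x]
--         k = -(-b // A) if A > 0 else None       # rounds until this monster dies (None: never)
--         if a > 0:
--             j = max(1, -(-B // a))              # first round after which the hero is down
--         elif B - a <= 0:
--             j = 1
--         else:
--             j = None                            # the hero outlasts this whole fight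
--         if k is not None and (j is None or j > k):
--             kills += 1
--             B -= k * a
--         else:
--             if j is not None and k == j:
--                 kills += 1
--             return "Hero is dead", kills
--     if kills == n:
--         return "Hero survived", kills
-- ===== Notes on version B (the rewrite author's own statement) =====
-- stated objective: alternative
-- what changed: Replaces the inner round-by-round fight simulation with a per-monster closed form: the monster's kill round and the hero's fall round are computed by ceil division and compared, one arithmetic step per monster.
import Mathlib
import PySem

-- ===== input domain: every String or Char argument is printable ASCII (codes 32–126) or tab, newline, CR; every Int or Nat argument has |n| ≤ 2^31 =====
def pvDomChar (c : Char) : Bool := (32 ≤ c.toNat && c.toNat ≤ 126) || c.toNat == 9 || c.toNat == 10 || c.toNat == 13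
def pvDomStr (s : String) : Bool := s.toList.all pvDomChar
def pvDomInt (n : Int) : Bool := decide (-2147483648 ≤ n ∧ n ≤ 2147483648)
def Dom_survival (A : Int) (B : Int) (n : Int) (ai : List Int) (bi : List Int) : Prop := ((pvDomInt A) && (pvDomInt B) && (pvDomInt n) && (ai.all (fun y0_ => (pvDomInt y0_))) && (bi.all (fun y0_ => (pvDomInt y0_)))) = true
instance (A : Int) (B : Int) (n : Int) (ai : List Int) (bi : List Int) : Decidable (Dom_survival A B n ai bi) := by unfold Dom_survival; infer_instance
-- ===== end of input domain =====

-- B replaces A's round-by-round inner fight simulation with a per-monster closed form: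
-- the monster's kill round and the hero's fall round are computed by ceil division and compared.

-- ===== PORT A =====
-- the `while z > 0` loop of A; the fuel only makes the recursion total (z.toNat + B.toNat + 1
-- steps suffice whenever the Python loop terminates; `none` = it did not finish in the fuel)
def survivalFightA (A a : Int) : Nat → Int → Int → Int → Option (Int × Int)
  | 0, z, B, y => if z > 0 then none else some (B, y)
  | Nat.succ f, z, B, y =>
    if z > 0 then
      let z' := z - A
      let B' := B - a
      let y' := if z' ≤ 0 then y + 1 else y
      if B' ≤ 0 then some (B', y')
      else survivalFightA A a f z' B' y'
    else some (B, y)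

-- the `for each_monster in range(n)` loop of A; ai[x] is read only when the while loop runs
-- (z > 0), exactly as in the Python; `none` = Python raised, diverged or returned no value
def survivalLoopA (A : Int) (n : Int) (ai bi : List Int) : Nat → Int → Int → Int → Option (String × Int)
  | 0, _x, _B, y => if y = n then some ("Hero survived", y) else none
  | Nat.succ f, x, B, y =>
    let x' := x + 1
    match PySem.List.pyGet? bi x' with
    | none => none
    | some z =>
      if 0 < z then
        match PySem.List.pyGet? ai x' with
        | none => none
        | some a =>
          match survivalFightA A a (z.toNat + B.toNat + 1) z B y with
          | none => none
          | some (B', y') =>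
            if B' ≤ 0 then some ("Hero is dead", y')
            else survivalLoopA A n ai bi f x' B' y'
      else
        if B ≤ 0 then some ("Hero is dead", y)
        else survivalLoopA A n ai bi f x' B y

def survival (A : Int) (B : Int) (n : Int) (ai : List Int) (bi : List Int) : String × Int :=
  (survivalLoopA A n ai bi n.toNat (-1) B 0).getD ("", 0)

-- ===== PORT B =====
-- Source B's `for x in range(n)` loop; `none` = Source B's implicit None
def survivalAltLoop (A n : Int) (ai bi : List Int) : Nat → Nat → Int → Int → Option (String × Int)
  | 0, _x, _B, kills => if kills = n then some ("Hero survived", kills) else none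
  | Nat.succ f, x, B, kills =>
    match PySem.List.pyGet? bi (x : Int) with
    | none => none
    | some b =>
      if b ≤ 0 then
        if B ≤ 0 then some ("Hero is dead", kills)
        else survivalAltLoop A n ai bi f (x + 1) B kills
      else
        match PySem.List.pyGet? ai (x : Int) with
        | none => none
        | some a =>
          let k : Option Int := if A > 0 then some (-(PySem.Int.floordiv (-b) A)) else none
          let j : Option Int :=
            if a > 0 then some (max 1 (-(PySem.Int.floordiv (-B) a)))
            else if B - a ≤ 0 then some 1 else none
          match k, j with
          | some kv, none => survivalAltLoop A n ai bi f (x + 1) (B - kv * a) (kills + 1)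
          | some kv, some jv =>
            if kv < jv then survivalAltLoop A n ai bi f (x + 1) (B - kv * a) (kills + 1)
            else if kv = jv then some ("Hero is dead", kills + 1)
            else some ("Hero is dead", kills)
          | none, _ => some ("Hero is dead", kills)

def survival_alt (A : Int) (B : Int) (n : Int) (ai : List Int) (bi : List Int) : String × Int :=
  (survivalAltLoop A n ai bi n.toNat 0 B 0).getD ("", 0)

-- ===== PRECONDITION & SPEC =====
-- Closed-form helpers for Pre_: ceiling division, the round in which the hero falls
-- (pvCeil A b + 1 encodes "never, within this fight"), the total damage the hero has taken
-- after the first m monsters, the index at which the hero stops, and index accessibility.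
def pvCeil (d x : Int) : Int := -(PySem.Int.floordiv (-x) d)

def pvJ (A a B b : Int) : Int :=
  if a > 0 then max 1 (pvCeil a B) else if B - a ≤ 0 then 1 else pvCeil A b + 1

def pvDmg (A : Int) (ai bi : List Int) (m : Nat) : Int :=
  ∑ j ∈ Finset.range m, (if 0 < bi.getD j 0 then pvCeil A (bi.getD j 0) * ai.getD j 0 else 0)

def pvStop (A B : Int) (ai bi : List Int) (j : Nat) : Prop :=
  if 0 < bi.getD j 0 then
    pvJ A (ai.getD j 0) (B - pvDmg A ai bi j) (bi.getD j 0) ≤ pvCeil A (bi.getD j 0)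
  else B - pvDmg A ai bi j ≤ 0

def pvAcc (ai bi : List Int) (m : Nat) : Prop :=
  m < bi.length ∧ ∀ j ≤ m, 0 < bi.getD j 0 → j < ai.length

-- Pre_ holds exactly when the Python A terminates with a tuple: it excludes only the inputs
-- where A raises IndexError (the hero, still alive, reaches an index past a list's end),
-- diverges (hero attack ≤ 0 against a monster that cannot bring the hero down), or falls off
-- returning None (n < 0, or all n monsters processed but a skipped dead monster left y < n).
def Pre_survival (A : Int) (B : Int) (n : Int) (ai : List Int) (bi : List Int) : Prop :=
  n = 0 ∨
  (1 ≤ n ∧ 1 ≤ A ∧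
    ((∃ m < min n.toNat bi.length, (∀ j < m, ¬ pvStop A B ai bi j) ∧ pvStop A B ai bi m ∧ pvAcc ai bi m) ∨
     (n.toNat ≤ bi.length ∧ n.toNat ≤ ai.length ∧ ∀ j < min n.toNat bi.length, 0 < bi.getD j 0))) ∨
  (1 ≤ n ∧ A ≤ 0 ∧
    ∃ m < min n.toNat bi.length, m < bi.length ∧ (∀ j < m, bi.getD j 0 ≤ 0 ∧ 0 < B) ∧
      ((bi.getD m 0 ≤ 0 ∧ B ≤ 0) ∨
       (0 < bi.getD m 0 ∧ m < ai.length ∧ (0 < ai.getD m 0 ∨ B - ai.getD m 0 ≤ 0))))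
instance (A : Int) (B : Int) (n : Int) (ai : List Int) (bi : List Int) : Decidable (Pre_survival A B n ai bi) := by
  unfold Pre_survival pvStop pvAcc; infer_instance

def pvWitness_survival : Int × Int × Int × List Int × List Int := (2, 10, 2, [1, 2], [3, 3])

def Spec_survival (A : Int) (B : Int) (n : Int) (ai : List Int) (bi : List Int) (out : String × Int) : Prop := out = survival_alt A B n ai bi
instance (A : Int) (B : Int) (n : Int) (ai : List Int) (bi : List Int) (out : String × Int) : Decidable (Spec_survival A B n ai bi out) := by unfold Spec_survival; infer_instance

-- ===== CLAIM (what is proved, stated in full; the proofs are below) =====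
def Claim_equal_survival : Prop := ∀ (A : Int) (B : Int) (n : Int) (ai : List Int) (bi : List Int), Dom_survival A B n ai bi → Pre_survival A B n ai bi → Spec_survival A B n ai bi (survival A B n ai bi)

-- ===== LEMMAS AND PROOFS =====

theorem pvCeil_bounds (d x : Int) (hd : 0 < d) :
    (pvCeil d x - 1) * d < x ∧ x ≤ pvCeil d x * d :=
  (PySem.Int.neg_floordiv_neg_eq_iff_of_pos hd).mp rfl

theorem pvCeil_eq (d x q : Int) (hd : 0 < d) (h1 : (q - 1) * d < x) (h2 : x ≤ q * d) :
    pvCeil d x = q :=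
  (PySem.Int.neg_floordiv_neg_eq_iff_of_pos hd).mpr ⟨h1, h2⟩

theorem pvCeil_one_le (d x : Int) (hd : 0 < d) (hx : 0 < x) : 1 ≤ pvCeil d x := by
  obtain ⟨h1, h2⟩ := pvCeil_bounds d x hd
  nlinarith

theorem pvCeil_eq_one (d x : Int) (hd : 0 < d) (hx : 0 < x) (hxd : x ≤ d) :
    pvCeil d x = 1 :=
  pvCeil_eq d x 1 hd (by simpa using hx) (by simpa using hxd)

theorem pvCeil_two_le (d x : Int) (hd : 0 < d) (hx : d < x) : 2 ≤ pvCeil d x := by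
  obtain ⟨h1, h2⟩ := pvCeil_bounds d x hd
  by_contra h
  have hk : pvCeil d x ≤ 1 := by omega
  nlinarith

theorem pvCeil_sub (d x : Int) (hd : 0 < d) (hx : 0 < x - d) :
    pvCeil d (x - d) = pvCeil d x - 1 := by
  obtain ⟨h1, h2⟩ := pvCeil_bounds d x hd
  exact pvCeil_eq d (x - d) (pvCeil d x - 1) hd (by nlinarith) (by nlinarith)

theorem pvCeil_le_of_pos (d x : Int) (hd : 0 < d) : pvCeil d x ≤ max 1 x := by
  obtain ⟨h1, h2⟩ := pvCeil_bounds d x hd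
  by_cases h : pvCeil d x ≤ 1
  · omega
  · have h3 : pvCeil d x - 1 ≤ (pvCeil d x - 1) * d := le_mul_of_one_le_right (by omega) hd
    omega

theorem pvJ_one_le (A a B b : Int) (hA : 1 ≤ A) (hb : 0 < b) : 1 ≤ pvJ A a B b := by
  have hk1 : 1 ≤ pvCeil A b := pvCeil_one_le A b (by omega) hb
  unfold pvJ; split_ifs <;> simp <;> omega

theorem pvCeil_le_one_of (a B : Int) (ha : 0 < a) (hB : B - a ≤ 0) : pvCeil a B ≤ 1 := by
  obtain ⟨h1, h2⟩ := pvCeil_bounds a B ha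
  by_contra hc
  have : 2 ≤ pvCeil a B := by omega
  nlinarith

theorem pvJ_one (A a B b : Int) (hB : B - a ≤ 0) : pvJ A a B b = 1 := by
  by_cases ha : a > 0
  · have hc : pvCeil a B ≤ 1 := pvCeil_le_one_of a B ha hB
    unfold pvJ
    rw [if_pos ha]
    omega
  · unfold pvJ; rw [if_neg ha, if_pos hB]

theorem pvJ_pred (A a B b : Int) (hA : 1 ≤ A) (hb : 0 < b - A) (hB : 0 < B - a) :
    pvJ A a (B - a) (b - A) = pvJ A a B b - 1 := by
  have hsub : pvCeil A (b - A) = pvCeil A b - 1 := pvCeil_sub A b (by omega) hb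
  by_cases ha : a > 0
  · have h2 : 2 ≤ pvCeil a B := pvCeil_two_le a B ha (by omega)
    have hsa : pvCeil a (B - a) = pvCeil a B - 1 := pvCeil_sub a B ha hB
    unfold pvJ
    rw [if_pos ha, if_pos ha, hsa]
    omega
  · have ha' : a ≤ 0 := by omega
    have hB2 : ¬ (B - a - a ≤ 0) := by omega
    unfold pvJ
    rw [if_neg ha, if_neg ha, if_neg hB2, if_neg (by omega : ¬ B - a ≤ 0), hsub]
    ring

theorem pvJ_gt (A a B b : Int) (hA : 1 ≤ A) (hb : 0 < b)
    (h : pvCeil A b < pvJ A a B b) : 0 < B - pvCeil A b * a := by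
  have hk1 : 1 ≤ pvCeil A b := pvCeil_one_le A b (by omega) hb
  unfold pvJ at h
  by_cases ha : a > 0
  · rw [if_pos ha] at h
    have hck : pvCeil A b < pvCeil a B := by
      rcases lt_max_iff.mp h with h' | h'
      · omega
      · exact h'
    have hmul : pvCeil A b * a ≤ (pvCeil a B - 1) * a :=
      mul_le_mul_of_nonneg_right (by omega) ha.le
    have hbd := (pvCeil_bounds a B ha).1
    linarith
  · rw [if_neg ha] at h
    by_cases hB : B - a ≤ 0
    · rw [if_pos hB] at h; exfalso; omega
    · have hmul : (pvCeil A b - 1) * a ≤ 0 :=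
        mul_nonpos_of_nonneg_of_nonpos (by omega) (by omega)
      nlinarith

theorem pvJ_eq (A a B b : Int) (hA : 1 ≤ A) (hb : 0 < b)
    (h : pvJ A a B b = pvCeil A b) : B - pvCeil A b * a ≤ 0 := by
  have hk1 : 1 ≤ pvCeil A b := pvCeil_one_le A b (by omega) hb
  unfold pvJ at h
  by_cases ha : a > 0
  · rw [if_pos ha] at h
    have hbd := (pvCeil_bounds a B ha).2
    have hcm : pvCeil a B ≤ max 1 (pvCeil a B) := le_max_right _ _
    have hmul : pvCeil a B * a ≤ pvCeil A b * a :=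
      mul_le_mul_of_nonneg_right (by omega) ha.le
    linarith
  · rw [if_neg ha] at h
    by_cases hB : B - a ≤ 0
    · rw [if_pos hB] at h
      rw [← h, one_mul]; exact hB
    · rw [if_neg hB] at h; exfalso; omega

theorem pvJ_lt (A a B b : Int) (hA : 1 ≤ A) (hb : 0 < b)
    (h : pvJ A a B b < pvCeil A b) : B - pvJ A a B b * a ≤ 0 := by
  unfold pvJ at h ⊢
  by_cases ha : a > 0
  · rw [if_pos ha] at h ⊢
    have hbd := (pvCeil_bounds a B ha).2
    have hmul : pvCeil a B * a ≤ max 1 (pvCeil a B) * a :=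
      mul_le_mul_of_nonneg_right (le_max_right _ _) ha.le
    linarith
  · rw [if_neg ha] at h ⊢
    by_cases hB : B - a ≤ 0
    · rw [if_pos hB] at h ⊢; rw [one_mul]; exact hB
    · rw [if_neg hB] at h; exfalso; omega

theorem fightA_nonpos (A a : Int) (fuel : Nat) (z B y : Int) (hz : ¬ z > 0) :
    survivalFightA A a fuel z B y = some (B, y) := by
  cases fuel <;> simp [survivalFightA, hz]

theorem fightA_succ (A a : Int) (f : Nat) (z B y : Int) (hz : 0 < z) :
    survivalFightA A a (f + 1) z B y =
      (if B - a ≤ 0 then some (B - a, if z - A ≤ 0 then y + 1 else y)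
       else survivalFightA A a f (z - A) (B - a) (if z - A ≤ 0 then y + 1 else y)) := by
  simp [survivalFightA, hz]

-- A's inner while loop in closed form, positive hero attack
theorem fightA_spec (A a : Int) (hA : 1 ≤ A) :
    ∀ (fuel : Nat) (z B y : Int), 0 < z → z ≤ (fuel : Int) →
      survivalFightA A a fuel z B y =
        some (if pvCeil A z ≤ pvJ A a B z
              then (B - pvCeil A z * a, y + 1)
              else (B - pvJ A a B z * a, y)) := by
  intro fuel
  induction fuel with
  | zero => intro z B y hz hle; exfalso; omega
  | succ f ih =>
    intro z B y hz hle
    rw [fightA_succ A a f z B y hz]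
    by_cases hzA : z - A ≤ 0
    · -- the monster dies this round: k = 1
      have hk : pvCeil A z = 1 := pvCeil_eq_one A z (by omega) hz (by omega)
      have hj : (1:Int) ≤ pvJ A a B z := pvJ_one_le A a B z hA hz
      rw [hk, one_mul, if_pos hj, if_pos hzA]
      by_cases hB : B - a ≤ 0
      · rw [if_pos hB]
      · rw [if_neg hB, fightA_nonpos A a f (z - A) (B - a) _ (by omega)]
    · -- the fight continues: k ≥ 2
      have hk2 : 2 ≤ pvCeil A z := pvCeil_two_le A z (by omega) (by omega)
      rw [if_neg hzA]
      by_cases hB : B - a ≤ 0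
      · have hj : pvJ A a B z = 1 := pvJ_one A a B z hB
        rw [if_pos hB, if_neg (show ¬ pvCeil A z ≤ pvJ A a B z by omega), hj, one_mul]
      · rw [if_neg hB, ih (z - A) (B - a) y (by omega) (by push_cast at hle ⊢; omega),
            pvCeil_sub A z (by omega) (by omega), pvJ_pred A a B z hA (by omega) (by omega)]
        by_cases hjk : pvCeil A z ≤ pvJ A a B z
        · rw [if_pos (show pvCeil A z - 1 ≤ pvJ A a B z - 1 by omega), if_pos hjk]
          simp only [Option.some.injEq, Prod.mk.injEq]
          exact ⟨by ring, trivial⟩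
        · rw [if_neg (show ¬ pvCeil A z - 1 ≤ pvJ A a B z - 1 by omega), if_neg hjk]
          simp only [Option.some.injEq, Prod.mk.injEq]
          exact ⟨by ring, trivial⟩

-- A's inner while loop with A ≤ 0 against a striking monster: the hero falls, no kill
theorem fightA_doom_pos (A a : Int) (hA : A ≤ 0) (ha : 0 < a) :
    ∀ (fuel : Nat) (z B y : Int), 0 < z → max 1 (pvCeil a B) ≤ (fuel : Int) →
      survivalFightA A a fuel z B y = some (B - max 1 (pvCeil a B) * a, y) := by
  intro fuel
  induction fuel with
  | zero =>
    intro z B y hz hle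
    have := le_max_left 1 (pvCeil a B)
    push_cast at hle
    exfalso; omega
  | succ f ih =>
    intro z B y hz hle
    rw [fightA_succ A a f z B y hz, if_neg (show ¬ z - A ≤ 0 by omega)]
    by_cases hB : B - a ≤ 0
    · have hc : pvCeil a B ≤ 1 := pvCeil_le_one_of a B ha hB
      rw [if_pos hB, show max 1 (pvCeil a B) = 1 by omega, one_mul]
    · have h2 : 2 ≤ pvCeil a B := pvCeil_two_le a B ha (by omega)
      have hsa : pvCeil a (B - a) = pvCeil a B - 1 := pvCeil_sub a B ha (by omega)
      rw [if_neg hB, ih (z - A) (B - a) y (by omega) (by rw [hsa]; push_cast at hle ⊢; omega),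
          hsa, show max 1 (pvCeil a B - 1) = max 1 (pvCeil a B) - 1 by omega]
      simp only [Option.some.injEq, Prod.mk.injEq]
      exact ⟨by ring, trivial⟩

theorem fightA_doom_neg (A a : Int) (f : Nat) (z B y : Int)
    (hA : A ≤ 0) (hB : B - a ≤ 0) (hz : 0 < z) :
    survivalFightA A a (f + 1) z B y = some (B - a, y) := by
  rw [fightA_succ A a f z B y hz, if_pos hB, if_neg (show ¬ z - A ≤ 0 by omega)]

-- proof-side invariant: "the Python A returns within f more monsters, starting at index i
-- with hero HP B" — exactly the hypotheses needed to mirror the two loops step by step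
def pvGood (A : Int) (ai bi : List Int) : Nat → Int → Nat → Prop
  | 0, _, _ => True
  | Nat.succ f, B, i =>
    i < bi.length ∧
    (if 0 < bi.getD i 0 then
      i < ai.length ∧
      (if 1 ≤ A then
        (pvCeil A (bi.getD i 0) < pvJ A (ai.getD i 0) B (bi.getD i 0) →
          pvGood A ai bi f (B - pvCeil A (bi.getD i 0) * ai.getD i 0) (i + 1))
       else (0 < ai.getD i 0 ∨ B - ai.getD i 0 ≤ 0))
     else (0 < B → pvGood A ai bi f B (i + 1)))

theorem pvDmg_succ (A : Int) (ai bi : List Int) (m : Nat) :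
    pvDmg A ai bi (m + 1) =
      pvDmg A ai bi m + (if 0 < bi.getD m 0 then pvCeil A (bi.getD m 0) * ai.getD m 0 else 0) :=
  Finset.sum_range_succ _ m

-- one-step unfoldings of the two loops (definitional)
theorem loopA_succ (A n : Int) (ai bi : List Int) (f : Nat) (x B y : Int) :
    survivalLoopA A n ai bi (f + 1) x B y =
      (match PySem.List.pyGet? bi (x + 1) with
       | none => none
       | some z =>
         if 0 < z then
           match PySem.List.pyGet? ai (x + 1) with
           | none => none
           | some a =>
             match survivalFightA A a (z.toNat + B.toNat + 1) z B y with
             | none => none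
             | some (B', y') =>
               if B' ≤ 0 then some ("Hero is dead", y')
               else survivalLoopA A n ai bi f (x + 1) B' y'
         else
           if B ≤ 0 then some ("Hero is dead", y)
           else survivalLoopA A n ai bi f (x + 1) B y) := rfl

theorem altLoop_succ (A n : Int) (ai bi : List Int) (f x : Nat) (B kills : Int) :
    survivalAltLoop A n ai bi (f + 1) x B kills =
      (match PySem.List.pyGet? bi (x : Int) with
       | none => none
       | some b =>
         if b ≤ 0 then
           if B ≤ 0 then some ("Hero is dead", kills)
           else survivalAltLoop A n ai bi f (x + 1) B kills
         else
           match PySem.List.pyGet? ai (x : Int) with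
           | none => none
           | some a =>
             match (if A > 0 then some (-(PySem.Int.floordiv (-b) A)) else none : Option Int),
                   (if a > 0 then some (max 1 (-(PySem.Int.floordiv (-B) a)))
                    else if B - a ≤ 0 then some 1 else none : Option Int) with
             | some kv, none => survivalAltLoop A n ai bi f (x + 1) (B - kv * a) (kills + 1)
             | some kv, some jv =>
               if kv < jv then survivalAltLoop A n ai bi f (x + 1) (B - kv * a) (kills + 1)
               else if kv = jv then some ("Hero is dead", kills + 1)
               else some ("Hero is dead", kills)
             | none, _ => some ("Hero is dead", kills)) := rfl

-- the two loops agree wherever pvGood holds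
theorem loop_eq (A n : Int) (ai bi : List Int) :
    ∀ (f : Nat) (i : Nat) (B y : Int), pvGood A ai bi f B i →
      survivalLoopA A n ai bi f ((i : Int) - 1) B y = survivalAltLoop A n ai bi f i B y := by
  intro f
  induction f with
  | zero => intro i B y _; rfl
  | succ f ih =>
    intro i B y hg
    obtain ⟨hbl, hg2⟩ := hg
    have hx : (i : Int) - 1 + 1 = ((i : Nat) : Int) := by ring
    have hbi : PySem.List.pyGet? bi ((i : Nat) : Int) = some bi[i] := by
      simp [List.getElem?_eq_getElem hbl]
    have hgd : bi.getD i 0 = bi[i] := List.getD_eq_getElem bi 0 hbl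
    rw [hgd] at hg2
    have hih : ∀ B' y' : Int, pvGood A ai bi f B' (i + 1) →
        survivalLoopA A n ai bi f ((i : Nat) : Int) B' y' = survivalAltLoop A n ai bi f (i + 1) B' y' := by
      intro B' y' h
      have := ih (i + 1) B' y' h
      push_cast at this ⊢
      simpa using this
    rw [loopA_succ, altLoop_succ, hx, hbi]
    by_cases hb : 0 < bi[i]
    · rw [if_pos hb] at hg2
      obtain ⟨hal, hg3⟩ := hg2
      have hai : PySem.List.pyGet? ai ((i : Nat) : Int) = some ai[i] := by
        simp [List.getElem?_eq_getElem hal]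
      have hga : ai.getD i 0 = ai[i] := List.getD_eq_getElem ai 0 hal
      rw [hga] at hg3
      simp only [hai, if_neg (show ¬ bi[i] ≤ 0 by omega), if_pos hb]
      set b := bi[i] with hbdef
      set a := ai[i] with hadef
      by_cases hA : 1 ≤ A
      · rw [if_pos hA] at hg3
        have hApos : A > 0 := by omega
        rw [fightA_spec A a hA (b.toNat + B.toNat + 1) b B y hb
          (by push_cast; have := Int.self_le_toNat b; omega)]
        have hkval : (-(PySem.Int.floordiv (-b) A)) = pvCeil A b := rfl
        have hc1 : 1 ≤ pvCeil A b := pvCeil_one_le A b (by omega) hb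
        by_cases ha : a > 0
        · have hjeq : pvJ A a B b = max 1 (-(PySem.Int.floordiv (-B) a)) := by
            unfold pvJ; rw [if_pos ha]; rfl
          simp only [if_pos hApos, if_pos ha, hkval, ← hjeq]
          rcases lt_trichotomy (pvCeil A b) (pvJ A a B b) with hlt | heq | hgt
          · have hpos := pvJ_gt A a B b hA hb hlt
            rw [if_pos (le_of_lt hlt), if_neg (show ¬ B - pvCeil A b * a ≤ 0 by omega),
                if_pos hlt]
            exact hih _ _ (hg3 hlt)
          · have hle := pvJ_eq A a B b hA hb heq.symm
            rw [if_pos (le_of_eq heq), if_pos hle, if_neg (show ¬ pvCeil A b < pvJ A a B b by omega),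
                if_pos heq]
          · have hle := pvJ_lt A a B b hA hb hgt
            rw [if_neg (show ¬ pvCeil A b ≤ pvJ A a B b by omega), if_pos hle,
                if_neg (show ¬ pvCeil A b < pvJ A a B b by omega),
                if_neg (show ¬ pvCeil A b = pvJ A a B b by omega)]
        · by_cases hBa : B - a ≤ 0
          · have hjeq : pvJ A a B b = 1 := by unfold pvJ; rw [if_neg ha, if_pos hBa]
            simp only [if_pos hApos, if_neg ha, if_pos hBa, hkval]
            rcases lt_trichotomy (pvCeil A b) (pvJ A a B b) with hlt | heq | hgt
            · omega
            · have hle := pvJ_eq A a B b hA hb heq.symm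
              rw [if_pos (le_of_eq heq), if_pos hle,
                  if_neg (show ¬ pvCeil A b < 1 by omega),
                  if_pos (show pvCeil A b = 1 by omega)]
            · have hle := pvJ_lt A a B b hA hb hgt
              rw [if_neg (show ¬ pvCeil A b ≤ pvJ A a B b by omega), if_pos hle,
                  if_neg (show ¬ pvCeil A b < 1 by omega),
                  if_neg (show ¬ pvCeil A b = 1 by omega)]
          · have hjeq : pvJ A a B b = pvCeil A b + 1 := by
              unfold pvJ; rw [if_neg ha, if_neg hBa]
            have hlt : pvCeil A b < pvJ A a B b := by omega
            have hpos := pvJ_gt A a B b hA hb hlt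
            simp only [if_pos hApos, if_neg ha, if_neg hBa, hkval]
            rw [if_pos (le_of_lt hlt), if_neg (show ¬ B - pvCeil A b * a ≤ 0 by omega)]
            exact hih _ _ (hg3 hlt)
      · rw [if_neg hA] at hg3
        have hAle : A ≤ 0 := by omega
        simp only [if_neg (show ¬ A > 0 by omega)]
        by_cases ha : a > 0
        · have hfuel : max 1 (pvCeil a B) ≤ ((b.toNat + B.toNat + 1 : Nat) : Int) := by
            have h1 := pvCeil_le_of_pos a B ha
            have h2 := Int.self_le_toNat B
            push_cast
            omega
          rw [fightA_doom_pos A a hAle ha (b.toNat + B.toNat + 1) b B y hb hfuel]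
          have hdead : B - max 1 (pvCeil a B) * a ≤ 0 := by
            have hbd := (pvCeil_bounds a B ha).2
            have hmul : pvCeil a B * a ≤ max 1 (pvCeil a B) * a :=
              mul_le_mul_of_nonneg_right (le_max_right _ _) ha.le
            linarith
          simp [hdead]
        · have hBa : B - a ≤ 0 := by
            rcases hg3 with h | h
            · omega
            · exact h
          rw [show b.toNat + B.toNat + 1 = (b.toNat + B.toNat) + 1 from rfl,
              fightA_doom_neg A a (b.toNat + B.toNat) b B y hAle hBa hb]
          simp [hBa]
    · rw [if_neg hb] at hg2
      simp only [if_neg hb, if_pos (show bi[i] ≤ 0 by omega)]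
      by_cases hB : B ≤ 0
      · rw [if_pos hB, if_pos hB]
      · rw [if_neg hB, if_neg hB]
        exact hih _ _ (hg2 (by omega))

-- Pre_'s stop-index branch (1 ≤ A) yields the invariant
theorem good_of_stop (A B0 : Int) (ai bi : List Int) (hA : 1 ≤ A) :
    ∀ (f i : Nat),
      (∃ m, i ≤ m ∧ m < i + f ∧ (∀ j, i ≤ j → j < m → ¬ pvStop A B0 ai bi j) ∧
        pvStop A B0 ai bi m ∧ pvAcc ai bi m) →
      pvGood A ai bi f (B0 - pvDmg A ai bi i) i := by
  intro f
  induction f with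
  | zero => intro i _; trivial
  | succ f ih =>
    intro i h
    obtain ⟨m, him, hmf, hmin, hstop, hacc⟩ := h
    refine ⟨by have := hacc.1; omega, ?_⟩
    by_cases hb : 0 < bi.getD i 0
    · rw [if_pos hb]
      refine ⟨hacc.2 i him hb, ?_⟩
      rw [if_pos hA]
      intro hsurv
      have hnstop : ¬ pvStop A B0 ai bi i := by
        unfold pvStop
        rw [if_pos hb]
        omega
      have hne : i ≠ m := fun he => hnstop (he ▸ hstop)
      have hdm : B0 - pvDmg A ai bi i - pvCeil A (bi.getD i 0) * ai.getD i 0 =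
          B0 - pvDmg A ai bi (i + 1) := by
        rw [pvDmg_succ, if_pos hb]; ring
      rw [hdm]
      exact ih (i + 1) ⟨m, by omega, by omega, fun j h1 h2 => hmin j (by omega) h2, hstop, hacc⟩
    · rw [if_neg hb]
      intro hpos
      have hnstop : ¬ pvStop A B0 ai bi i := by
        unfold pvStop
        rw [if_neg hb]
        omega
      have hne : i ≠ m := fun he => hnstop (he ▸ hstop)
      have hdm : pvDmg A ai bi (i + 1) = pvDmg A ai bi i := by
        rw [pvDmg_succ, if_neg hb]; ring
      have := ih (i + 1) ⟨m, by omega, by omega, fun j h1 h2 => hmin j (by omega) h2, hstop, hacc⟩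
      rwa [hdm] at this
-- Pre_'s all-monsters-well-formed branch (1 ≤ A) yields the invariant
theorem good_of_clear (A B0 : Int) (ai bi : List Int) (N : Nat) (hA : 1 ≤ A)
    (hbl : N ≤ bi.length) (hall : ∀ j < N, 0 < bi.getD j 0 ∧ j < ai.length) :
    ∀ (f i : Nat), i + f = N → pvGood A ai bi f (B0 - pvDmg A ai bi i) i := by
  intro f
  induction f with
  | zero => intro i _; trivial
  | succ f ih =>
    intro i hif
    obtain ⟨hb, hal⟩ := hall i (by omega)
    refine ⟨by omega, ?_⟩
    rw [if_pos hb, if_pos hA]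
    refine ⟨hal, fun _ => ?_⟩
    have hdm : B0 - pvDmg A ai bi i - pvCeil A (bi.getD i 0) * ai.getD i 0 =
        B0 - pvDmg A ai bi (i + 1) := by
      rw [pvDmg_succ, if_pos hb]; ring
    rw [hdm]
    exact ih (i + 1) (by omega)

-- Pre_'s A ≤ 0 branch yields the invariant
theorem good_of_neg (A B : Int) (ai bi : List Int) (hA : A ≤ 0) :
    ∀ (f i : Nat),
      (∃ m, i ≤ m ∧ m < i + f ∧ m < bi.length ∧
        (∀ j, i ≤ j → j < m → bi.getD j 0 ≤ 0 ∧ 0 < B) ∧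
        ((bi.getD m 0 ≤ 0 ∧ B ≤ 0) ∨
         (0 < bi.getD m 0 ∧ m < ai.length ∧ (0 < ai.getD m 0 ∨ B - ai.getD m 0 ≤ 0)))) →
      pvGood A ai bi f B i := by
  intro f
  induction f with
  | zero => intro i _; trivial
  | succ f ih =>
    intro i h
    obtain ⟨m, him, hmf, hml, hskip, hcase⟩ := h
    refine ⟨by omega, ?_⟩
    by_cases hie : i = m
    · subst hie
      rcases hcase with ⟨hb, hB⟩ | ⟨hb, hal, hfin⟩
      · rw [if_neg (show ¬ 0 < bi.getD i 0 by omega)]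
        intro hpos; omega
      · rw [if_pos hb, if_neg (show ¬ 1 ≤ A by omega)]
        exact ⟨hal, hfin⟩
    · have hlt : i < m := by omega
      obtain ⟨hbi, hB⟩ := hskip i (le_refl i) hlt
      rw [if_neg (show ¬ 0 < bi.getD i 0 by omega)]
      intro _
      exact ih (i + 1) ⟨m, by omega, by omega, hml, fun j h1 h2 => hskip j (by omega) h2, hcase⟩

-- ===== VERDICT (by name: the statement is the Claim_ definition above) =====
theorem survival_spec : Claim_equal_survival := by
  intro A B n ai bi _hdom hpre
  unfold Spec_survival survival survival_alt
  have hz : pvDmg A ai bi 0 = 0 := rfl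
  rcases hpre with h0 | ⟨hn, hA, hbr⟩ | ⟨hn, hA, m, hm, hml, hskip, hcase⟩
  · subst h0
    rfl
  · have hg : pvGood A ai bi n.toNat B 0 := by
      rcases hbr with ⟨m, hm, hmin, hstop, hacc⟩ | ⟨hbl, hal, hall⟩
      · have := good_of_stop A B ai bi hA n.toNat 0
          ⟨m, by omega, by omega, fun j _ h2 => hmin j h2, hstop, hacc⟩
        rwa [hz, sub_zero] at this
      · have := good_of_clear A B ai bi n.toNat hA hbl
          (fun j hj => ⟨hall j (by omega), by omega⟩) n.toNat 0 (by omega)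
        rwa [hz, sub_zero] at this
    have := loop_eq A n ai bi n.toNat 0 B 0 hg
    norm_num at this
    rw [this]
  · have hg : pvGood A ai bi n.toNat B 0 :=
      good_of_neg A B ai bi hA n.toNat 0
        ⟨m, by omega, by omega, hml, fun j _ h2 => hskip j h2, hcase⟩
    have := loop_eq A n ai bi n.toNat 0 B 0 hg
    norm_num at this
    rw [this]
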